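-- pv_equiv track=rewrite | github.com/Esteves31/ProjetoFinalGrafos | src/graph_utils.py | find_tree_centers
-- ===== SOURCE A (Python) =====
-- from collections import deque
--
-- def get_vertex_id(v):
--     """Extrai o id do vértice, seja tupla, dict ou valor simples."""
--     if isinstance(v, dict):
--         return v['id']
--     elif isinstance(v, (tuple, list)) and len(v) == 2:
--         return v[1]
--     else:
--         return v
--
-- def get_vertices(edge):
--     """Retorna os vértices de uma aresta (assume formato (u, v, ...))."""
--     return edge[0], edge[1]
--
-- def get_label(edge):
--     """Retorna o label da aresta, se existir."""
--     if len(edge) > 2: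
--         return edge[2]
--     return None
--
-- def build_adjacency_list(nodes, edges):
--     ids = [get_vertex_id(v) for v in nodes]
--     adjacency_list = {vid: [] for vid in ids}
--     for edge in edges:
--         u, v = get_vertices(edge)
--         uid = get_vertex_id(u)
--         vid = get_vertex_id(v)
--         label = get_label(edge)
--         adjacency_list[uid].append((vid, label))
--         adjacency_list[vid].append((uid, label))  # Não direcionado
--     return adjacency_list
--
-- def find_tree_centers(nodes, edges):
--     n = len(nodes)
--     if n <= 2:
--         return nodes
--     adj = build_adjacency_list(nodes, edges)
--     degrees = {node: len(adj[node]) for node in nodes}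
--     leaves = deque()
--     for node in nodes:
--         if degrees[node] == 1:
--             leaves.append(node)
--     remaining_nodes = n
--     while remaining_nodes > 2:
--         leaves_in_this_layer = len(leaves)
--         remaining_nodes -= leaves_in_this_layer
--         for _ in range(leaves_in_this_layer):
--             leaf = leaves.popleft()
--             for neighbor, _ in adj[leaf]:
--                 degrees[neighbor] -= 1
--                 if degrees[neighbor] == 1:
--                     leaves.append(neighbor)
--     centers = list(leaves)
--     return centers
-- ===== SOURCE B (Python) =====
-- from collections import Counter
--
-- def find_tree_centers(nodes, edges):
--     if len(nodes) <= 2: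
--         return nodes
--     deg = Counter()
--     for u, v in edges:
--         deg[u] += 1
--         deg[v] += 1
--     keep = [v for v in nodes if deg[v] != 1]
--     kset = set(keep)
--     kept = [(u, v) for (u, v) in edges if u in kset and v in kset]
--     return find_tree_centers(keep, kept)
-- ===== Notes on version B (the rewrite author's own statement) =====
-- stated objective: simpler
-- what changed: A's imperative peeling (mutable degree dict decremented in place, deque popped layer by layer, remaining-node counter) is replaced by a short recursion on the shrinking graph itself: each call recounts degrees of the current edge list with a Counter, drops the leaves, filters the edge list to the kept vertices and recurses, with no mutation, no deque and no incremental bookkeeping; …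
-- outside the precondition, e.g. on find_tree_centers([0, 1, 2], [(0, 1)]): A returns [], B returns [2]; on find_tree_centers([4, 1, 2, 3], [(1, 2), (2, 3), (3, 4)]): A returns [3, 2], B returns [2, 3]
import Mathlib
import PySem

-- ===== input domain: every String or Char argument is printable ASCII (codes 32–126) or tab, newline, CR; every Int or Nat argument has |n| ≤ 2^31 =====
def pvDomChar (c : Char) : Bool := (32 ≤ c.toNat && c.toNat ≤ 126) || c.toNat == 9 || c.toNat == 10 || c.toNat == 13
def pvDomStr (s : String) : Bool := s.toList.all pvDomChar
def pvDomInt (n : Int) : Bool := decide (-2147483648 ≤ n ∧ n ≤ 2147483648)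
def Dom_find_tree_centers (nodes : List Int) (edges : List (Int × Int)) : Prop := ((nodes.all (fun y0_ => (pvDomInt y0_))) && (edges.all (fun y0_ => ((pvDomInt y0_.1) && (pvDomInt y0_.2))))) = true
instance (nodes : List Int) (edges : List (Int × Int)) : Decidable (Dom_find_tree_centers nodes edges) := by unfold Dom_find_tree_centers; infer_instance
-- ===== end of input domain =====

-- B replaces A's imperative peeling (mutable degree dict, deque popped layer by layer,
-- remaining counter) by a short recursion on the shrinking graph itself: recount degrees,
-- drop the leaves, filter the edges, recurse; objective: simpler (no mutable state).
-- ===== PORT A =====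

-- get_vertex_id: the dict/tuple branches are unreachable for int vertices
def get_vertex_id (v : Int) : Int := v

def get_vertices (edge : Int × Int) : Int × Int := (edge.1, edge.2)

-- len(edge) > 2 is false for a pair, so the label is always None
def get_label (_edge : Int × Int) : Option Int := none

def build_adjacency_list (nodes : List Int) (edges : List (Int × Int)) :
    PySem.Dict Int (List (Int × Option Int)) :=
  let ids := nodes.map get_vertex_id
  let adjacency_list := ids.foldl (fun d vid => d.insert vid []) PySem.Dict.empty
  edges.foldl (fun d edge =>
    let uv := get_vertices edge
    let uid := get_vertex_id uv.1
    let vid := get_vertex_id uv.2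
    let label := get_label edge
    -- adjacency_list[uid].append(...) raises KeyError on a missing key (excluded by Pre_);
    -- Dict.modify with default [] is the total stand-in
    let d := d.modify uid [] (fun l => l ++ [(vid, label)])
    d.modify vid [] (fun l => l ++ [(uid, label)])) adjacency_list

-- body of the inner 'for neighbor, _ in adj[leaf]' loop: decrement the neighbour's
-- degree, append it to the deque if the degree became 1
def stepA (s : PySem.Dict Int Int × List Int) (nb : Int × Option Int) :
    PySem.Dict Int Int × List Int :=
  let degrees' := s.1.modify nb.1 0 (fun x => x - 1)
  if degrees'.getD nb.1 0 == 1 then (degrees', s.2 ++ [nb.1]) else (degrees', s.2)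

-- 'for _ in range(leaves_in_this_layer)' loop: pop a leaf, run the inner loop
def popLayerA (adj : PySem.Dict Int (List (Int × Option Int))) :
    Nat → PySem.Dict Int Int → List Int → PySem.Dict Int Int × List Int
  | 0, degrees, leaves => (degrees, leaves)
  | k + 1, degrees, leaves =>
    match leaves with
    | [] => (degrees, [])  -- popleft on an empty deque raises; unreachable: k is the deque's length
    | leaf :: rest =>
      let s := (adj.getD leaf []).foldl stepA (degrees, rest)
      popLayerA adj k s.1 s.2

-- 'while remaining_nodes > 2' loop; fuel nodes.length bounds the rounds (inside Pre_ the
-- loop exits earlier; outside, Python may loop forever)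
def peelA (adj : PySem.Dict Int (List (Int × Option Int))) :
    Nat → PySem.Dict Int Int → List Int → Int → List Int
  | 0, _, leaves, _ => leaves
  | fuel + 1, degrees, leaves, remaining =>
    if remaining > 2 then
      let leaves_in_this_layer := leaves.length
      let remaining' := remaining - leaves_in_this_layer
      let s := popLayerA adj leaves_in_this_layer degrees leaves
      peelA adj fuel s.1 s.2 remaining'
    else leaves

def find_tree_centers (nodes : List Int) (edges : List (Int × Int)) : List Int :=
  let n : Int := nodes.length
  if n ≤ 2 then nodes
  else
    let adj := build_adjacency_list nodes edges
    let degrees : PySem.Dict Int Int :=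
      nodes.foldl (fun d node => d.insert node ((adj.getD node []).length : Int)) PySem.Dict.empty
    let leaves : List Int :=
      nodes.foldl (fun q node => if degrees.getD node 0 == 1 then q ++ [node] else q) []
    peelA adj nodes.length degrees leaves n

-- ===== PORT B =====

-- deg = Counter(); for u, v in edges: deg[u] += 1; deg[v] += 1
def countDeg (edges : List (Int × Int)) : PySem.Dict Int Int :=
  edges.foldl (fun d e =>
    let d := d.modify e.1 0 (fun x => x + 1)
    d.modify e.2 0 (fun x => x + 1)) PySem.Dict.empty

-- the recursion of Source B; fuel makes it total (inside Pre_ the graph loses at least one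
-- vertex per call, so fuel = len(nodes) is never exhausted; outside, Python B may hit the
-- recursion limit)
def find_tree_centers_alt_rec : Nat → List Int → List (Int × Int) → List Int
  | 0, nodes, _ => nodes
  | fuel + 1, nodes, edges =>
    if (nodes.length : Int) ≤ 2 then nodes
    else
      let deg := countDeg edges
      let keep := nodes.filter (fun v => !(deg.getD v 0 == 1))
      let kset := PySem.Set.ofList keep
      let kept := edges.filter (fun e => kset.contains e.1 && kset.contains e.2)
      find_tree_centers_alt_rec fuel keep kept

def find_tree_centers_alt (nodes : List Int) (edges : List (Int × Int)) : List Int :=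
  find_tree_centers_alt_rec nodes.length nodes edges

-- ===== PRECONDITION & SPEC =====

def undirKey (e : Int × Int) : Int × Int := if e.1 ≤ e.2 then e else (e.2, e.1)

-- neighbour list of v (one entry per incident edge end, in edge order)
def adjL (edges : List (Int × Int)) (v : Int) : List Int :=
  edges.flatMap (fun e => (if e.1 = v then [e.2] else []) ++ (if e.2 = v then [e.1] else []))

-- number of neighbours of v inside the vertex set R
def cnt (edges : List (Int × Int)) (R : List Int) (v : Int) : Int :=
  (((adjL edges v).filter (fun w => R.contains w)).length : Int)

-- one round of leaf-trimming: drop the vertices with exactly one neighbour in R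
def peelStepM (edges : List (Int × Int)) (R : List Int) : List Int :=
  R.filter (fun v => !(cnt edges R v == 1))

-- Pre_ admits every n ≤ 2 input (A returns nodes untouched) and, for n ≥ 3, exactly the
-- simple trees (distinct nodes; n-1 distinct non-loop edges with endpoints among the
-- nodes; every proper nonempty vertex subset crossed by an edge, i.e. connected) whose
-- iterated leaf-trimming ends in ONE vertex. Excluded, in one sentence: non-tree graphs,
-- on which A raises KeyError, loops forever, or returns leftover deque artefacts such as
-- [], and trees with TWO centers, where the relative order of the two equally-central
-- vertices in A's output is an accidental tie of deque append order.
def Pre_find_tree_centers (nodes : List Int) (edges : List (Int × Int)) : Prop :=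
  nodes.length ≤ 2 ∨
  (nodes.Nodup ∧ edges.length + 1 = nodes.length ∧
   (∀ e ∈ edges, e.1 ∈ nodes ∧ e.2 ∈ nodes ∧ e.1 ≠ e.2) ∧
   (edges.map undirKey).Nodup ∧
   (∀ S ∈ nodes.toFinset.powerset, S.Nonempty → S ≠ nodes.toFinset →
     ∃ e ∈ edges, (e.1 ∈ S ∧ e.2 ∉ S) ∨ (e.2 ∈ S ∧ e.1 ∉ S)) ∧
   (∃ k ∈ List.range (nodes.length + 1), ((peelStepM edges)^[k] nodes).length = 1))

instance (nodes : List Int) (edges : List (Int × Int)) : Decidable (Pre_find_tree_centers nodes edges) := by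
  unfold Pre_find_tree_centers; infer_instance

def pvWitness_find_tree_centers : List Int × (List (Int × Int)) :=
  ([1, 2, 3, 4, 5], [(1, 2), (2, 3), (3, 4), (4, 5)])

def Spec_find_tree_centers (nodes : List Int) (edges : List (Int × Int)) (out : List Int) : Prop :=
  out = find_tree_centers_alt nodes edges

instance (nodes : List Int) (edges : List (Int × Int)) (out : List Int) : Decidable (Spec_find_tree_centers nodes edges out) := by
  unfold Spec_find_tree_centers; infer_instance

-- ===== CLAIM (what is proved, stated in full; the proofs are below) =====
def Claim_equal_find_tree_centers : Prop := ∀ (nodes : List Int) (edges : List (Int × Int)), Dom_find_tree_centers nodes edges → Pre_find_tree_centers nodes edges → Spec_find_tree_centers nodes edges (find_tree_centers nodes edges)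

-- ===== LEMMAS AND PROOFS =====

-- the common mathematical skeleton both ports are reduced to: trim leaves until ≤ 2
-- vertices remain (fuel-bounded)
def mathPeel (edges : List (Int × Int)) : Nat → List Int → List Int
  | 0, R => R
  | fuel + 1, R => if R.length ≤ 2 then R else mathPeel edges fuel (peelStepM edges R)

-- edges with both endpoints in R
def eR (edges : List (Int × Int)) (R : List Int) : List (Int × Int) :=
  edges.filter (fun e => R.contains e.1 && R.contains e.2)

-- global well-formedness of the edge list over the node list (from Pre_)
def EdgeOK (nodes : List Int) (edges : List (Int × Int)) : Prop :=
  (∀ e ∈ edges, e.1 ∈ nodes ∧ e.2 ∈ nodes ∧ e.1 ≠ e.2) ∧ (edges.map undirKey).Nodup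

-- cut characterization of connectivity of the graph induced on R
def CutP (edges : List (Int × Int)) (R : List Int) : Prop :=
  ∀ S : Finset Int, S ⊆ R.toFinset → S.Nonempty → S ≠ R.toFinset →
    ∃ e ∈ eR edges R, (e.1 ∈ S ∧ e.2 ∉ S) ∨ (e.2 ∈ S ∧ e.1 ∉ S)

def IsTree (edges : List (Int × Int)) (R : List Int) : Prop :=
  R ≠ [] ∧ R.Nodup ∧ (eR edges R).length + 1 = R.length ∧ CutP edges R

-- R with the popped prefix p removed
def minus (R p : List Int) : List Int := R.filter (fun v => !(p.contains v))

theorem adjL_cons (e : Int × Int) (es : List (Int × Int)) (v : Int) :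
    adjL (e :: es) v =
      ((if e.1 = v then [e.2] else []) ++ (if e.2 = v then [e.1] else [])) ++ adjL es v := by
  simp [adjL]

theorem mem_adjL_iff (edges : List (Int × Int)) (v w : Int) :
    w ∈ adjL edges v ↔ ∃ e ∈ edges, (e.1 = v ∧ e.2 = w) ∨ (e.2 = v ∧ e.1 = w) := by
  induction edges with
  | nil => simp [adjL]
  | cons e es ih =>
    rw [adjL_cons]
    simp only [List.mem_append, ih, List.mem_cons]
    constructor
    · rintro ((h | h) | ⟨e', he', h⟩)
      · split_ifs at h with h1 <;> simp_all
      · split_ifs at h with h1 <;> simp_all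
      · exact ⟨e', Or.inr he', h⟩
    · rintro ⟨e', (rfl | he'), h⟩
      · rcases h with ⟨h1, h2⟩ | ⟨h1, h2⟩
        · exact Or.inl (Or.inl (by simp [h1, h2]))
        · exact Or.inl (Or.inr (by simp [h1, h2]))
      · exact Or.inr ⟨e', he', h⟩

theorem mem_adjL_symm (edges : List (Int × Int)) (v w : Int) :
    w ∈ adjL edges v ↔ v ∈ adjL edges w := by
  rw [mem_adjL_iff, mem_adjL_iff]
  constructor <;> (rintro ⟨e, he, h⟩; exact ⟨e, he, by tauto⟩)

theorem length_le_of_nodup_subset (l m : List Int) (hl : l.Nodup) (h : ∀ x ∈ l, x ∈ m) :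
    l.length ≤ m.length := by
  calc l.length = l.toFinset.card := (List.toFinset_card_of_nodup hl).symm
  _ ≤ m.toFinset.card := Finset.card_le_card (fun x hx => by
      simp only [List.mem_toFinset] at hx ⊢; exact h x hx)
  _ ≤ m.length := m.toFinset_card_le

-- two distinct alive neighbours force cnt ≥ 2
theorem cnt_ge_two (nodes : List Int) (edges : List (Int × Int)) (hE : EdgeOK nodes edges)
    (R : List Int) (v w1 w2 : Int) (h1 : w1 ∈ adjL edges v) (h2 : w2 ∈ adjL edges v)
    (hR1 : w1 ∈ R) (hR2 : w2 ∈ R) (hne : w1 ≠ w2) : 2 ≤ cnt edges R v := by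
  have hm1 : w1 ∈ (adjL edges v).filter (fun w => R.contains w) :=
    List.mem_filter.mpr ⟨h1, by simpa using hR1⟩
  have hm2 : w2 ∈ (adjL edges v).filter (fun w => R.contains w) :=
    List.mem_filter.mpr ⟨h2, by simpa using hR2⟩
  have := length_le_of_nodup_subset [w1, w2] ((adjL edges v).filter (fun w => R.contains w))
    (by simp [hne])
    (by intro x hx
        simp only [List.mem_cons, List.not_mem_nil, or_false] at hx
        rcases hx with rfl | rfl
        exacts [hm1, hm2])
  simp only [List.length_cons, List.length_nil] at this
  unfold cnt
  omega

theorem adjL_mem_nodes (nodes : List Int) (edges : List (Int × Int))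
    (hE : EdgeOK nodes edges) (v w : Int) (h : w ∈ adjL edges v) : w ∈ nodes := by
  rw [mem_adjL_iff] at h
  obtain ⟨e, he, h⟩ := h
  obtain ⟨h1, h2, _⟩ := hE.1 e he
  rcases h with ⟨_, rfl⟩ | ⟨_, rfl⟩ <;> assumption

theorem adjL_not_mem (nodes : List Int) (edges : List (Int × Int))
    (hE : EdgeOK nodes edges) (v : Int) (h : v ∉ nodes) : adjL edges v = [] := by
  cases hA : adjL edges v with
  | nil => rfl
  | cons w t =>
    exfalso
    have hw : w ∈ adjL edges v := by rw [hA]; exact List.mem_cons_self ..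
    rw [mem_adjL_iff] at hw
    obtain ⟨e, he, hw⟩ := hw
    obtain ⟨h1, h2, _⟩ := hE.1 e he
    rcases hw with ⟨rfl, _⟩ | ⟨rfl, _⟩ <;> exact h (by assumption)

theorem undirKey_swap (a b : Int) : undirKey (a, b) = undirKey (b, a) := by
  unfold undirKey
  split_ifs with h1 h2 h2 <;> simp_all <;> omega

theorem undirKey_of_mem_pair (e : Int × Int) (v a : Int)
    (h : (e.1 = v ∧ e.2 = a) ∨ (e.2 = v ∧ e.1 = a)) : undirKey e = undirKey (v, a) := by
  rcases h with ⟨h1, h2⟩ | ⟨h1, h2⟩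
  · rw [show e = (v, a) from Prod.ext h1 h2]
  · rw [show e = (a, v) from Prod.ext h2 h1, undirKey_swap]

theorem adjL_nodup (nodes : List Int) (edges : List (Int × Int))
    (hE : EdgeOK nodes edges) (v : Int) : (adjL edges v).Nodup := by
  obtain ⟨hends, hukey⟩ := hE
  induction edges with
  | nil => simp [adjL]
  | cons e es ih =>
    have hukey' := hukey
    rw [List.map_cons, List.nodup_cons] at hukey'
    rw [adjL_cons]
    apply List.Nodup.append
    · have hne := (hends e (List.mem_cons_self ..)).2.2
      split_ifs with h1 h2 h2 <;> simp_all
    · exact ih (fun e' he' => hends e' (List.mem_cons_of_mem _ he')) hukey'.2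
    · intro a ha hb
      have hkey : undirKey e = undirKey (v, a) := by
        apply undirKey_of_mem_pair
        split_ifs at ha with h1 h2 h2 <;> simp_all
      rw [mem_adjL_iff] at hb
      obtain ⟨e', he', hb⟩ := hb
      have hkey' : undirKey e' = undirKey (v, a) := undirKey_of_mem_pair e' v a hb
      exact hukey'.1 (by rw [hkey, ← hkey']; exact List.mem_map_of_mem he')

theorem not_self_mem_adjL (nodes : List Int) (edges : List (Int × Int))
    (hE : EdgeOK nodes edges) (v : Int) : v ∉ adjL edges v := by
  intro h
  rw [mem_adjL_iff] at h
  obtain ⟨e, he, h⟩ := h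
  have := (hE.1 e he).2.2
  rcases h with ⟨h1, h2⟩ | ⟨h1, h2⟩ <;> exact this (by rw [h1, h2])

-- cnt is monotone in the alive set
theorem cnt_mono (edges : List (Int × Int)) (R R' : List Int)
    (h : ∀ v ∈ R', v ∈ R) (v : Int) : cnt edges R' v ≤ cnt edges R v := by
  unfold cnt
  have : ((adjL edges v).filter (fun w => R'.contains w)).length
      ≤ ((adjL edges v).filter (fun w => R.contains w)).length := by
    apply List.Sublist.length_le
    apply List.monotone_filter_right
    intro a ha
    simp only [decide_eq_true_eq] at ha ⊢
    simpa using h a (by simpa using ha)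
  exact_mod_cast this

theorem cnt_nonneg (edges : List (Int × Int)) (R : List Int) (v : Int) :
    0 ≤ cnt edges R v := by
  unfold cnt
  positivity

theorem mem_minus (R p : List Int) (v : Int) : v ∈ minus R p ↔ v ∈ R ∧ v ∉ p := by
  simp [minus]

theorem filter_length_erase (l : List Int) (hl : l.Nodup) (P : Int → Bool) (u : Int) :
    ((l.filter (fun w => P w && !(w == u))).length : Int)
      = ((l.filter P).length : Int) - (if u ∈ l ∧ P u = true then 1 else 0) := by
  induction l with
  | nil => simp
  | cons a t ih =>
    rw [List.nodup_cons] at hl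
    have iht := ih hl.2
    by_cases hau : a = u
    · have hut : u ∉ t := fun h => hl.1 (by rw [hau]; exact h)
      have hifold : (if u ∈ t ∧ P u = true then (1 : Int) else 0) = 0 := by simp [hut]
      rw [hifold] at iht
      have hbeq : (a == u) = true := by simp [hau]
      by_cases hP : P a = true
      · have hif : (if u ∈ a :: t ∧ P u = true then (1 : Int) else 0) = 1 := by
          simp [← hau, hP]
        rw [hif, List.filter_cons, List.filter_cons, hbeq]
        simp only [Bool.not_true, Bool.and_false, Bool.false_eq_true, if_false, hP, if_true]
        simp only [List.length_cons, iht]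
        push_cast
        ring
      · have hif : (if u ∈ a :: t ∧ P u = true then (1 : Int) else 0) = 0 := by
          simp [← hau, hP]
        rw [hif, List.filter_cons, List.filter_cons, hbeq]
        simp only [Bool.not_true, Bool.and_false, Bool.false_eq_true, if_false, hP]
        simpa using iht
    · have hbeq : (a == u) = false := by simp [hau]
      have hmemc : (u ∈ a :: t) ↔ (u ∈ t) := by
        simp only [List.mem_cons, or_iff_right_iff_imp]
        intro h; exact absurd h.symm hau
      have hif : (if u ∈ a :: t ∧ P u = true then (1 : Int) else 0)
          = (if u ∈ t ∧ P u = true then (1 : Int) else 0) :=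
        if_congr (and_congr_left (fun _ => hmemc)) rfl rfl
      rw [hif, List.filter_cons, List.filter_cons, hbeq]
      by_cases hP : P a = true
      · simp only [hP, Bool.not_false, Bool.and_true, Bool.true_and, if_true, List.length_cons]
        by_cases hm : u ∈ t ∧ P u = true <;> simp only [hm, if_true, if_false] at iht ⊢ <;>
          omega
      · simp only [hP, Bool.not_false, Bool.and_true, Bool.false_eq_true, if_false]
        exact iht

theorem cnt_minus_snoc (nodes : List Int) (edges : List (Int × Int)) (hE : EdgeOK nodes edges)
    (R p : List Int) (u v : Int) (hu : u ∈ minus R p) :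
    cnt edges (minus R (p ++ [u])) v =
      cnt edges (minus R p) v - (if v ∈ adjL edges u then 1 else 0) := by
  unfold cnt
  have hcong : (adjL edges v).filter (fun w => (minus R (p ++ [u])).contains w)
      = (adjL edges v).filter (fun w => (minus R p).contains w && !(w == u)) := by
    apply List.filter_congr
    intro a _
    have h1 : a ∈ minus R (p ++ [u]) ↔ (a ∈ minus R p ∧ a ≠ u) := by
      rw [mem_minus, mem_minus]
      simp only [List.mem_append, List.mem_cons, List.not_mem_nil]
      tauto
    rw [Bool.eq_iff_iff]
    simp only [Bool.and_eq_true, Bool.not_eq_true', beq_eq_false_iff_ne,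
      List.contains_eq_mem, decide_eq_true_eq]
    exact h1
  rw [hcong, filter_length_erase (adjL edges v) (adjL_nodup nodes edges hE v)
    (fun w => (minus R p).contains w) u]
  have hiff : (u ∈ adjL edges v ∧ (((minus R p).contains u) = true)) ↔ (v ∈ adjL edges u) := by
    rw [← mem_adjL_symm]
    simp [hu]
  rw [if_congr hiff rfl rfl]

-- cnt over the full node list is the full degree
theorem cnt_nodes (nodes : List Int) (edges : List (Int × Int)) (hE : EdgeOK nodes edges)
    (v : Int) : cnt edges nodes v = ((adjL edges v).length : Int) := by
  have hf : (adjL edges v).filter (fun w => nodes.contains w) = adjL edges v :=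
    List.filter_eq_self.mpr (fun a ha => by simpa using adjL_mem_nodes nodes edges hE v a ha)
  unfold cnt
  rw [hf]

-- ---- tree combinatorics ----

theorem sum_indicator_k (L : List Int) (hL : L.Nodup) (a k : Int) :
    (L.map (fun v => if v = a then k else 0)).sum = if a ∈ L then k else 0 := by
  induction L with
  | nil => simp
  | cons x t ih =>
    rw [List.nodup_cons] at hL
    rw [List.map_cons, List.sum_cons, ih hL.2]
    by_cases hx : x = a
    · have hat : a ∉ t := hx ▸ hL.1
      simp [hx, hat]
    · have hmc : (a ∈ x :: t) ↔ (a ∈ t) := by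
        simp only [List.mem_cons, or_iff_right_iff_imp]
        intro h; exact absurd h.symm hx
      rw [if_neg hx, if_congr hmc rfl rfl, zero_add]

theorem incidence_sum (nodes : List Int) (edges : List (Int × Int)) (hE : EdgeOK nodes edges)
    (R L : List Int) (hL : L.Nodup) (hLR : ∀ v ∈ L, v ∈ R) :
    (L.map (cnt edges R)).sum =
      ((eR edges R).countP (fun e => L.contains e.1) : Int) +
      ((eR edges R).countP (fun e => L.contains e.2) : Int) := by
  induction edges with
  | nil =>
    rw [show cnt [] R = fun _ => (0 : Int) from funext fun v => by simp [cnt, adjL]]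
    simp [eR]
  | cons e es ih =>
    have hE' : EdgeOK nodes es := ⟨fun e' he' => hE.1 e' (List.mem_cons_of_mem _ he'),
      (List.nodup_cons.mp (by simpa using hE.2)).2⟩
    have hdec : ∀ v, cnt (e :: es) R v
        = ((if v = e.1 then (if e.2 ∈ R then (1 : Int) else 0) else 0)
            + (if v = e.2 then (if e.1 ∈ R then (1 : Int) else 0) else 0)) + cnt es R v := by
      intro v
      unfold cnt
      rw [adjL_cons, List.filter_append, List.length_append]
      push_cast
      have hcontrib : (((((if e.1 = v then [e.2] else []) ++ (if e.2 = v then [e.1] else []))).filter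
            (fun w => R.contains w)).length : Int)
          = (if v = e.1 then (if e.2 ∈ R then (1 : Int) else 0) else 0)
            + (if v = e.2 then (if e.1 ∈ R then (1 : Int) else 0) else 0) := by
        by_cases h1 : e.1 = v <;> by_cases h2 : e.2 = v <;>
          by_cases hR1 : e.1 ∈ R <;> by_cases hR2 : e.2 ∈ R <;>
          simp_all [List.filter_cons, eq_comm] <;> omega
      rw [hcontrib]
      try ring
    have hmap : L.map (cnt (e :: es) R)
        = L.map (fun v => ((if v = e.1 then (if e.2 ∈ R then (1 : Int) else 0) else 0)
            + (if v = e.2 then (if e.1 ∈ R then (1 : Int) else 0) else 0)) + cnt es R v) :=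
      List.map_congr_left (fun v _ => hdec v)
    rw [hmap, PySem.List.sum_map_add_int, PySem.List.sum_map_add_int,
      sum_indicator_k L hL e.1 _, sum_indicator_k L hL e.2 _, ih hE']
    show _ = ((eR (e :: es) R).countP (fun e => L.contains e.1) : Int)
      + ((eR (e :: es) R).countP (fun e => L.contains e.2) : Int)
    unfold eR
    rw [List.filter_cons]
    by_cases hin : (R.contains e.1 && R.contains e.2) = true
    · have hmem : e.1 ∈ R ∧ e.2 ∈ R := by
        simp only [Bool.and_eq_true, List.contains_eq_mem, decide_eq_true_eq] at hin
        exact hin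
      rw [if_pos hin, List.countP_cons, List.countP_cons]
      by_cases hL1 : e.1 ∈ L <;> by_cases hL2 : e.2 ∈ L <;>
        simp [hL1, hL2, hmem.1, hmem.2] <;> push_cast <;> ring
    · have hnmem : ¬ (e.1 ∈ R ∧ e.2 ∈ R) := by
        intro hc
        exact hin (by simp [hc.1, hc.2])
      rw [if_neg hin]
      have h1 : (if e.1 ∈ L then (if e.2 ∈ R then (1 : Int) else 0) else 0) = 0 := by
        by_cases hL1 : e.1 ∈ L <;> by_cases hR2 : e.2 ∈ R <;>
          simp [hL1, hR2] <;> exact absurd ⟨hLR e.1 hL1, hR2⟩ hnmem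
      have h2 : (if e.2 ∈ L then (if e.1 ∈ R then (1 : Int) else 0) else 0) = 0 := by
        by_cases hL2 : e.2 ∈ L <;> by_cases hR1 : e.1 ∈ R <;>
          simp [hL2, hR1] <;> exact absurd ⟨hR1, hLR e.2 hL2⟩ hnmem
      rw [h1, h2]
      ring

-- cut ⟹ positive minimum degree
theorem cnt_pos_of_cut (edges : List (Int × Int)) (R : List Int) (hR : R.Nodup)
    (hcut : CutP edges R) (h2 : 2 ≤ R.length) (v : Int) (hv : v ∈ R) :
    1 ≤ cnt edges R v := by
  have hS : ({v} : Finset Int) ⊆ R.toFinset := by simp [hv]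
  have hne : ({v} : Finset Int).Nonempty := ⟨v, by simp⟩
  have hneq : ({v} : Finset Int) ≠ R.toFinset := by
    intro h
    have hc := List.toFinset_card_of_nodup hR
    rw [← h] at hc
    simp at hc
    omega
  obtain ⟨e, he, hcross⟩ := hcut {v} hS hne hneq
  have he' := List.mem_filter.mp he
  have heE : e ∈ edges := he'.1
  have heR : e.1 ∈ R ∧ e.2 ∈ R := by
    have := he'.2
    simp only [Bool.and_eq_true, List.contains_eq_mem, decide_eq_true_eq] at this
    exact this
  rcases hcross with ⟨h1, _⟩ | ⟨h1, _⟩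
  · have h1' : e.1 = v := Finset.mem_singleton.mp h1
    have hadj : e.2 ∈ adjL edges v := (mem_adjL_iff edges v e.2).mpr ⟨e, heE, Or.inl ⟨h1', rfl⟩⟩
    have hmem : e.2 ∈ (adjL edges v).filter (fun w => R.contains w) :=
      List.mem_filter.mpr ⟨hadj, by simpa using heR.2⟩
    have := List.length_pos_of_ne_nil (List.ne_nil_of_mem hmem)
    unfold cnt
    omega
  · have h1' : e.2 = v := Finset.mem_singleton.mp h1
    have hadj : e.1 ∈ adjL edges v := (mem_adjL_iff edges v e.1).mpr ⟨e, heE, Or.inr ⟨h1', rfl⟩⟩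
    have hmem : e.1 ∈ (adjL edges v).filter (fun w => R.contains w) :=
      List.mem_filter.mpr ⟨hadj, by simpa using heR.1⟩
    have := List.length_pos_of_ne_nil (List.ne_nil_of_mem hmem)
    unfold cnt
    omega

theorem exists_leaf (nodes : List Int) (edges : List (Int × Int)) (hE : EdgeOK nodes edges)
    (R : List Int) (hT : IsTree edges R) (h2 : 2 ≤ R.length) :
    ∃ v ∈ R, cnt edges R v = 1 := by
  by_contra hno
  push_neg at hno
  have hall : ∀ v ∈ R, 2 ≤ cnt edges R v := by
    intro v hv
    have h1 := cnt_pos_of_cut edges R hT.2.1 hT.2.2.2 h2 v hv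
    have := hno v hv
    omega
  have hlow : 2 * (R.length : Int) ≤ (R.map (cnt edges R)).sum := by
    calc 2 * (R.length : Int) = (R.map (fun _ => (2 : Int))).sum := by
          simp [PySem.List.sum_map_const_int]; ring
      _ ≤ (R.map (cnt edges R)).sum := List.sum_le_sum hall
  have hup := incidence_sum nodes edges hE R R hT.2.1 (fun v hv => hv)
  have hc1 : (eR edges R).countP (fun e => R.contains e.1) ≤ (eR edges R).length :=
    List.countP_le_length
  have hc2 : (eR edges R).countP (fun e => R.contains e.2) ≤ (eR edges R).length :=
    List.countP_le_length
  have hcnt := hT.2.2.1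
  omega

theorem exists_internal (nodes : List Int) (edges : List (Int × Int)) (hE : EdgeOK nodes edges)
    (R : List Int) (hT : IsTree edges R) (h3 : 3 ≤ R.length) :
    ∃ v ∈ R, 2 ≤ cnt edges R v := by
  by_contra hno
  push_neg at hno
  have hall : ∀ v ∈ R, cnt edges R v ≤ 1 := by
    intro v hv
    have := hno v hv
    omega
  have hup : (R.map (cnt edges R)).sum ≤ (R.length : Int) := by
    calc (R.map (cnt edges R)).sum ≤ (R.map (fun _ => (1 : Int))).sum := List.sum_le_sum hall
      _ = (R.length : Int) := by simp [PySem.List.sum_map_const_int]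
  have hlow := incidence_sum nodes edges hE R R hT.2.1 (fun v hv => hv)
  have hc1 : (eR edges R).countP (fun e => R.contains e.1) = (eR edges R).length := by
    rw [List.countP_eq_length]
    intro e he
    have := List.mem_filter.mp he
    simp only [Bool.and_eq_true] at this
    exact this.2.1
  have hc2 : (eR edges R).countP (fun e => R.contains e.2) = (eR edges R).length := by
    rw [List.countP_eq_length]
    intro e he
    have := List.mem_filter.mp he
    simp only [Bool.and_eq_true] at this
    exact this.2.2
  have hcnt := hT.2.2.1
  omega

theorem pred_partition {α : Type} (p : α → Bool) (l : List α) :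
    (l.filter (fun v => !(p v))).length + (l.filter p).length = l.length := by
  induction l with
  | nil => simp
  | cons a t iht =>
    rw [List.filter_cons, List.filter_cons]
    by_cases hc : p a = true
    · simp only [hc, Bool.not_true, Bool.false_eq_true, if_false, if_true, List.length_cons]
      omega
    · have hc' : p a = false := Bool.eq_false_iff.mpr hc
      simp only [hc', Bool.not_false, Bool.false_eq_true, if_true, if_false, List.length_cons]
      omega

theorem countP_or_and {α : Type} (l : List α) (p q : α → Bool) :
    l.countP (fun a => p a || q a) + l.countP (fun a => p a && q a)
      = l.countP p + l.countP q := by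
  induction l with
  | nil => simp
  | cons a t ih =>
    rw [List.countP_cons, List.countP_cons, List.countP_cons, List.countP_cons]
    by_cases hp : p a = true <;> by_cases hq : q a = true <;> simp [hp, hq] <;> omega

-- in a tree on ≥ 3 vertices no edge joins two leaves
theorem no_leaf_leaf (nodes : List Int) (edges : List (Int × Int)) (hE : EdgeOK nodes edges)
    (R : List Int) (hT : IsTree edges R) (h3 : 3 ≤ R.length)
    (v w : Int) (hv : v ∈ R) (hw : w ∈ R) (hvw : w ∈ adjL edges v)
    (h1v : cnt edges R v = 1) : ¬ cnt edges R w = 1 := by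
  intro h1w
  have hvw' : v ≠ w := by
    intro h
    exact not_self_mem_adjL nodes edges hE v (h ▸ hvw)
  have hS : ({v, w} : Finset Int) ⊆ R.toFinset := by
    intro x hx
    rcases Finset.mem_insert.mp hx with rfl | hx
    · simp [hv]
    · rw [Finset.mem_singleton.mp hx]; simp [hw]
  have hne : ({v, w} : Finset Int).Nonempty := ⟨v, by simp⟩
  have hneq : ({v, w} : Finset Int) ≠ R.toFinset := by
    intro h
    have hc := List.toFinset_card_of_nodup hT.2.1
    rw [← h] at hc
    have hcard2 : ({v, w} : Finset Int).card ≤ 2 := by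
      have := Finset.card_insert_le v ({w} : Finset Int)
      simpa using this
    omega
  obtain ⟨e, he, hcross⟩ := hT.2.2.2 {v, w} hS hne hneq
  have he' := List.mem_filter.mp he
  have heE : e ∈ edges := he'.1
  have heR : e.1 ∈ R ∧ e.2 ∈ R := by
    have := he'.2
    simp only [Bool.and_eq_true, List.contains_eq_mem, decide_eq_true_eq] at this
    exact this
  rcases hcross with ⟨h1, h2⟩ | ⟨h1, h2⟩ <;>
    rcases Finset.mem_insert.mp h1 with rfl | h1'
  · -- e.1 = v, e.2 outside {v, w}
    have hadj2 : e.2 ∈ adjL edges e.1 := (mem_adjL_iff edges e.1 e.2).mpr ⟨e, heE, Or.inl ⟨rfl, rfl⟩⟩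
    have hne2 : w ≠ e.2 := fun h => h2 (by rw [← h]; simp)
    have := cnt_ge_two nodes edges hE R e.1 w e.2 hvw hadj2 hw heR.2 hne2
    omega
  · -- e.1 = w
    have hadj2 : e.2 ∈ adjL edges w := (mem_adjL_iff edges w e.2).mpr
      ⟨e, heE, Or.inl ⟨Finset.mem_singleton.mp h1', rfl⟩⟩
    have hadjv : v ∈ adjL edges w := (mem_adjL_symm edges v w).mp hvw
    have hnev : v ≠ e.2 := fun h => h2 (by rw [← h]; simp)
    have := cnt_ge_two nodes edges hE R w v e.2 hadjv hadj2 hv heR.2 hnev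
    omega
  · -- e.2 = v
    have hadj1 : e.1 ∈ adjL edges e.2 := (mem_adjL_iff edges e.2 e.1).mpr ⟨e, heE, Or.inr ⟨rfl, rfl⟩⟩
    have hne1 : w ≠ e.1 := fun h => h2 (by rw [← h]; simp)
    have := cnt_ge_two nodes edges hE R e.2 w e.1 hvw hadj1 hw heR.1 hne1
    omega
  · -- e.2 = w
    have hadj1 : e.1 ∈ adjL edges w := (mem_adjL_iff edges w e.1).mpr
      ⟨e, heE, Or.inr ⟨Finset.mem_singleton.mp h1', rfl⟩⟩
    have hadjv : v ∈ adjL edges w := (mem_adjL_symm edges v w).mp hvw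
    have hnev : v ≠ e.1 := fun h => h2 (by rw [← h]; simp)
    have := cnt_ge_two nodes edges hE R w v e.1 hadjv hadj1 hv heR.1 hnev
    omega

-- peeling all the leaves of a tree on ≥ 3 vertices leaves a nonempty tree
theorem peel_tree (nodes : List Int) (edges : List (Int × Int)) (hE : EdgeOK nodes edges)
    (R : List Int) (hT : IsTree edges R) (h3 : 3 ≤ R.length) :
    IsTree edges (R.filter (fun v => !(cnt edges R v == 1))) := by
  obtain ⟨hRne, hRnd, hRcnt, hRcut⟩ := hT
  have hmemR' : ∀ x, x ∈ R.filter (fun v => !(cnt edges R v == 1)) ↔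
      (x ∈ R ∧ cnt edges R x ≠ 1) := by
    intro x
    rw [List.mem_filter]
    simp
  have hmemL : ∀ x, x ∈ R.filter (fun v => cnt edges R v == 1) ↔
      (x ∈ R ∧ cnt edges R x = 1) := by
    intro x
    rw [List.mem_filter]
    simp
  have hLnd : (R.filter (fun v => cnt edges R v == 1)).Nodup := hRnd.filter _
  have hLR : ∀ v ∈ R.filter (fun v => cnt edges R v == 1), v ∈ R :=
    fun v hv => ((hmemL v).mp hv).1
  obtain ⟨vi, hvi, hvi2⟩ := exists_internal nodes edges hE R ⟨hRne, hRnd, hRcnt, hRcut⟩ h3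
  have hne' : R.filter (fun v => !(cnt edges R v == 1)) ≠ [] :=
    List.ne_nil_of_mem ((hmemR' vi).mpr ⟨hvi, by omega⟩)
  have hpart : (R.filter (fun v => !(cnt edges R v == 1))).length
      + (R.filter (fun v => cnt edges R v == 1)).length = R.length :=
    pred_partition (fun v => cnt edges R v == 1) R
  have heR' : eR edges (R.filter (fun v => !(cnt edges R v == 1)))
      = (eR edges R).filter (fun e => !(cnt edges R e.1 == 1) && !(cnt edges R e.2 == 1)) := by
    unfold eR
    rw [List.filter_filter]
    apply List.filter_congr
    intro e _
    rw [Bool.eq_iff_iff]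
    simp only [Bool.and_eq_true, List.contains_eq_mem, decide_eq_true_eq, List.mem_filter,
      Bool.not_eq_true', beq_eq_false_iff_ne]
    tauto
  have hincid := incidence_sum nodes edges hE R (R.filter (fun v => cnt edges R v == 1)) hLnd hLR
  have hsum1 : ((R.filter (fun v => cnt edges R v == 1)).map (cnt edges R)).sum
      = ((R.filter (fun v => cnt edges R v == 1)).length : Int) := by
    rw [List.map_congr_left (fun v hv => ((hmemL v).mp hv).2)]
    simp
  have hand0 : (eR edges R).countP
      (fun e => (cnt edges R e.1 == 1) && (cnt edges R e.2 == 1)) = 0 := by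
    rw [List.countP_eq_zero]
    intro e he
    have he' := List.mem_filter.mp he
    have heR : e.1 ∈ R ∧ e.2 ∈ R := by
      have := he'.2
      simp only [Bool.and_eq_true, List.contains_eq_mem, decide_eq_true_eq] at this
      exact this
    have hadj : e.2 ∈ adjL edges e.1 :=
      (mem_adjL_iff edges e.1 e.2).mpr ⟨e, he'.1, Or.inl ⟨rfl, rfl⟩⟩
    simp only [Bool.and_eq_true, beq_iff_eq, not_and]
    intro h1 h2
    exact no_leaf_leaf nodes edges hE R ⟨hRne, hRnd, hRcnt, hRcut⟩ h3 e.1 e.2 heR.1 heR.2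
      hadj h1 h2
  have hcong1 : (eR edges R).countP
        (fun e => (R.filter (fun v => cnt edges R v == 1)).contains e.1)
      = (eR edges R).countP (fun e => cnt edges R e.1 == 1) := by
    apply List.countP_congr
    intro e he
    have he' := List.mem_filter.mp he
    have h1R : e.1 ∈ R := by
      have := he'.2
      simp only [Bool.and_eq_true, List.contains_eq_mem, decide_eq_true_eq] at this
      exact this.1
    rw [Bool.eq_iff_iff]
    simp only [List.contains_eq_mem, decide_eq_true_eq, hmemL]
    simp [h1R]
  have hcong2 : (eR edges R).countP
        (fun e => (R.filter (fun v => cnt edges R v == 1)).contains e.2)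
      = (eR edges R).countP (fun e => cnt edges R e.2 == 1) := by
    apply List.countP_congr
    intro e he
    have he' := List.mem_filter.mp he
    have h2R : e.2 ∈ R := by
      have := he'.2
      simp only [Bool.and_eq_true, List.contains_eq_mem, decide_eq_true_eq] at this
      exact this.2
    rw [Bool.eq_iff_iff]
    simp only [List.contains_eq_mem, decide_eq_true_eq, hmemL]
    simp [h2R]
  have hie := countP_or_and (eR edges R) (fun e => cnt edges R e.1 == 1)
    (fun e => cnt edges R e.2 == 1)
  have hpartE : ((eR edges R).filter
        (fun e => !(cnt edges R e.1 == 1) && !(cnt edges R e.2 == 1))).length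
      + ((eR edges R).filter
        (fun e => (cnt edges R e.1 == 1) || (cnt edges R e.2 == 1))).length
      = (eR edges R).length := by
    have hDM : (eR edges R).filter (fun e => !(cnt edges R e.1 == 1) && !(cnt edges R e.2 == 1))
        = (eR edges R).filter (fun e => !((cnt edges R e.1 == 1) || (cnt edges R e.2 == 1))) :=
      List.filter_congr (fun e _ => by simp)
    rw [hDM]
    exact pred_partition _ _
  have hcnt' : (eR edges (R.filter (fun v => !(cnt edges R v == 1)))).length + 1
      = (R.filter (fun v => !(cnt edges R v == 1))).length := by
    rw [heR']
    have hcount_or : ((eR edges R).filter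
          (fun e => (cnt edges R e.1 == 1) || (cnt edges R e.2 == 1))).length
        = (R.filter (fun v => cnt edges R v == 1)).length := by
      have hL1 : ((eR edges R).countP (fun e => (cnt edges R e.1 == 1) || (cnt edges R e.2 == 1)))
          = (R.filter (fun v => cnt edges R v == 1)).length := by
        have hsum := hincid
        rw [hsum1, hcong1, hcong2] at hsum
        have : ((eR edges R).countP (fun e => cnt edges R e.1 == 1))
            + ((eR edges R).countP (fun e => cnt edges R e.2 == 1))
            = (R.filter (fun v => cnt edges R v == 1)).length := by
          exact_mod_cast hsum.symm
        omega
      rw [← hL1, List.countP_eq_length_filter]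
    have hlfL : 1 ≤ (R.filter (fun v => !(cnt edges R v == 1))).length := by
      have := List.length_pos_of_ne_nil hne'
      omega
    omega
  refine ⟨hne', hRnd.filter _, hcnt', ?_⟩
  intro S' hS' hne'' hneq'
  have hS'R : ∀ x ∈ S', x ∈ R ∧ cnt edges R x ≠ 1 := by
    intro x hx
    exact (hmemR' x).mp (List.mem_toFinset.mp (hS' hx))
  set S : Finset Int := S' ∪ ((R.filter (fun v => cnt edges R v == 1)).toFinset.filter
    (fun l => ∃ u ∈ adjL edges l, u ∈ S')) with hSdef
  have hSsub : S ⊆ R.toFinset := by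
    intro x hx
    rcases Finset.mem_union.mp hx with hx | hx
    · exact List.mem_toFinset.mpr (hS'R x hx).1
    · have := List.mem_toFinset.mp (Finset.mem_of_mem_filter x hx)
      exact List.mem_toFinset.mpr (((hmemL x).mp this).1)
  have hSne : S.Nonempty := by
    obtain ⟨x, hx⟩ := hne''
    exact ⟨x, Finset.mem_union_left _ hx⟩
  have hleafS : ∀ a b, a ∈ R → b ∈ R → b ∈ adjL edges a → cnt edges R a = 1 →
      (a ∈ S ↔ b ∈ S') := by
    intro a b haR hbR hab ha1
    constructor
    · intro haS
      rcases Finset.mem_union.mp haS with hx | hx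
      · exact absurd ha1 (hS'R a hx).2
      · obtain ⟨u, hu, huS⟩ := (Finset.mem_filter.mp hx).2
        have huR : u ∈ R := (hS'R u huS).1
        by_cases hub : u = b
        · exact hub ▸ huS
        · exact absurd (cnt_ge_two nodes edges hE R a u b hu hab huR hbR hub) (by omega)
    · intro hbS
      apply Finset.mem_union_right
      refine Finset.mem_filter.mpr ⟨List.mem_toFinset.mpr ((hmemL a).mpr ⟨haR, ha1⟩), b, hab, hbS⟩
  have hSneq : S ≠ R.toFinset := by
    obtain ⟨y, hyR', hyS'⟩ := Finset.exists_of_ssubset (hS'.ssubset_of_ne hneq')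
    have hy := (hmemR' y).mp (List.mem_toFinset.mp hyR')
    intro h
    have hyS : y ∈ S := h ▸ List.mem_toFinset.mpr hy.1
    rcases Finset.mem_union.mp hyS with hx | hx
    · exact hyS' hx
    · have := List.mem_toFinset.mp (Finset.mem_of_mem_filter y hx)
      exact hy.2 ((hmemL y).mp this).2
  obtain ⟨e, he, hcross⟩ := hRcut S hSsub hSne hSneq
  have he' := List.mem_filter.mp he
  have heR : e.1 ∈ R ∧ e.2 ∈ R := by
    have := he'.2
    simp only [Bool.and_eq_true, List.contains_eq_mem, decide_eq_true_eq] at this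
    exact this
  have hadj12 : e.2 ∈ adjL edges e.1 :=
    (mem_adjL_iff edges e.1 e.2).mpr ⟨e, he'.1, Or.inl ⟨rfl, rfl⟩⟩
  have hadj21 : e.1 ∈ adjL edges e.2 := (mem_adjL_symm edges e.2 e.1).mpr hadj12
  have h1nl : cnt edges R e.1 ≠ 1 := by
    intro h1
    have hiff := hleafS e.1 e.2 heR.1 heR.2 hadj12 h1
    rcases hcross with ⟨hA, hB⟩ | ⟨hA, hB⟩
    · exact hB (Finset.mem_union_left _ (hiff.mp hA))
    · rcases Finset.mem_union.mp hA with hx | hx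
      · exact hB (hiff.mpr hx)
      · have := ((hmemL e.2).mp (List.mem_toFinset.mp (Finset.mem_of_mem_filter e.2 hx))).2
        exact no_leaf_leaf nodes edges hE R ⟨hRne, hRnd, hRcnt, hRcut⟩ h3 e.1 e.2 heR.1 heR.2
          hadj12 h1 this
  have h2nl : cnt edges R e.2 ≠ 1 := by
    intro h2
    have hiff := hleafS e.2 e.1 heR.2 heR.1 hadj21 h2
    rcases hcross with ⟨hA, hB⟩ | ⟨hA, hB⟩
    · rcases Finset.mem_union.mp hA with hx | hx
      · exact hB (hiff.mpr hx)
      · have := ((hmemL e.1).mp (List.mem_toFinset.mp (Finset.mem_of_mem_filter e.1 hx))).2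
        exact no_leaf_leaf nodes edges hE R ⟨hRne, hRnd, hRcnt, hRcut⟩ h3 e.2 e.1 heR.2 heR.1
          hadj21 h2 this
    · exact hB (Finset.mem_union_left _ (hiff.mp hA))
  have hmemS : ∀ x, x ∈ R → cnt edges R x ≠ 1 → (x ∈ S ↔ x ∈ S') := by
    intro x hxR hx1
    constructor
    · intro hxS
      rcases Finset.mem_union.mp hxS with hx | hx
      · exact hx
      · exact absurd ((hmemL x).mp (List.mem_toFinset.mp (Finset.mem_of_mem_filter x hx))).2 hx1
    · exact Finset.mem_union_left _
  have heE' : e ∈ eR edges (R.filter (fun v => !(cnt edges R v == 1))) := by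
    apply List.mem_filter.mpr
    refine ⟨he'.1, ?_⟩
    have h1 : e.1 ∈ R.filter (fun v => !(cnt edges R v == 1)) := (hmemR' e.1).mpr ⟨heR.1, h1nl⟩
    have h2 : e.2 ∈ R.filter (fun v => !(cnt edges R v == 1)) := (hmemR' e.2).mpr ⟨heR.2, h2nl⟩
    simp [h1, h2]
  refine ⟨e, heE', ?_⟩
  rcases hcross with ⟨hA, hB⟩ | ⟨hA, hB⟩
  · exact Or.inl ⟨(hmemS e.1 heR.1 h1nl).mp hA, fun h => hB (Finset.mem_union_left _ h)⟩
  · exact Or.inr ⟨(hmemS e.2 heR.2 h2nl).mp hA, fun h => hB (Finset.mem_union_left _ h)⟩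

-- ---- plumbing shared with the wiring ----

theorem getD_foldl_insert_nil {ν : Type} (xs : List Int) (c : ν)
    (d : PySem.Dict Int ν) (h : ∀ v, d.getD v c = c) :
    ∀ v, (xs.foldl (fun d x => d.insert x c) d).getD v c = c := by
  induction xs generalizing d with
  | nil => exact h
  | cons x xs ih =>
    refine ih _ (fun v => ?_)
    rw [PySem.Dict.getD_insert]
    split_ifs
    · rfl
    · exact h v

theorem foldA_getD (edges : List (Int × Int))
    (d0 : PySem.Dict Int (List (Int × Option Int))) :
    ∀ v, (edges.foldl (fun d e =>
        (d.modify e.1 [] (fun l => l ++ [(e.2, (none : Option Int))])).modify e.2 []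
          (fun l => l ++ [(e.1, (none : Option Int))])) d0).getD v []
      = d0.getD v [] ++ (adjL edges v).map (fun w => (w, (none : Option Int))) := by
  induction edges generalizing d0 with
  | nil => intro v; simp [adjL]
  | cons e es ih =>
    intro v
    simp only [List.foldl_cons]
    rw [ih ((d0.modify e.1 [] (fun l => l ++ [(e.2, (none : Option Int))])).modify e.2 []
      (fun l => l ++ [(e.1, (none : Option Int))])) v]
    rw [adjL_cons]
    simp only [PySem.Dict.getD_modify]
    split_ifs <;> subst_vars <;> simp_all [List.append_assoc]

theorem buildA_getD (nodes : List Int) (edges : List (Int × Int)) (v : Int) :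
    (build_adjacency_list nodes edges).getD v [] =
      (adjL edges v).map (fun w => (w, (none : Option Int))) := by
  unfold build_adjacency_list
  simp only [get_vertices, get_vertex_id, get_label]
  rw [foldA_getD]
  rw [getD_foldl_insert_nil (nodes.map get_vertex_id) [] PySem.Dict.empty (fun v => by simp [pysem]) v]
  simp

theorem getD_foldl_insert_fn (xs : List Int) (f : Int → Int) (d : PySem.Dict Int Int)
    (v : Int) :
    (xs.foldl (fun d x => d.insert x (f x)) d).getD v 0 =
      if v ∈ xs then f v else d.getD v 0 := by
  induction xs generalizing d with
  | nil => simp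
  | cons x xs ih =>
    rw [List.foldl_cons, ih]
    by_cases hvx : v ∈ xs
    · simp [hvx, List.mem_cons]
    · rw [PySem.Dict.getD_insert]
      by_cases hvx2 : v = x <;> simp [hvx, hvx2, List.mem_cons]

theorem foldNbrs_A (ws : List Int) (hn : ws.Nodup) (D : PySem.Dict Int Int) (acc : List Int) :
    ((ws.map (fun w => (w, (none : Option Int)))).foldl stepA (D, acc)).2
        = acc ++ ws.filter (fun w => D.getD w 0 == 2) ∧
    ∀ v, (((ws.map (fun w => (w, (none : Option Int)))).foldl stepA (D, acc)).1).getD v 0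
        = D.getD v 0 - (if v ∈ ws then 1 else 0) := by
  rw [List.foldl_map]
  induction ws generalizing D acc with
  | nil => simp
  | cons w ws ih =>
    rw [List.nodup_cons] at hn
    have hstep : stepA (D, acc) (w, (none : Option Int))
        = (D.modify w 0 (fun x => x - 1),
           acc ++ (if D.getD w 0 == 2 then [w] else [])) := by
      by_cases hc : D.getD w 0 = 2
      · simp [stepA, PySem.Dict.getD_modify_self, beq_iff_eq, hc]
      · have hc1 : ¬(D.getD w 0 - 1 = 1) := by omega
        simp [stepA, PySem.Dict.getD_modify_self, beq_iff_eq, hc, hc1]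
    rw [List.foldl_cons, hstep]
    obtain ⟨ih1, ih2⟩ := ih hn.2 (D.modify w 0 (fun x => x - 1))
      (acc ++ (if D.getD w 0 == 2 then [w] else []))
    have hfc : ws.filter (fun u => (D.modify w 0 (fun x => x - 1)).getD u 0 == 2)
        = ws.filter (fun u => D.getD u 0 == 2) := by
      apply List.filter_congr
      intro u hu
      have hne : ¬ u = w := fun h => hn.1 (h ▸ hu)
      rw [PySem.Dict.getD_modify, if_neg hne]
    constructor
    · rw [ih1, hfc, List.filter_cons]
      by_cases hc : (D.getD w 0 == 2) = true
      · simp only [hc, if_true, List.append_assoc, List.cons_append, List.nil_append]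
      · have hc' := Bool.eq_false_iff.mpr hc
        simp only [hc', Bool.false_eq_true, if_false, List.append_nil]
    · intro v
      rw [ih2 v, PySem.Dict.getD_modify]
      by_cases hvw : v = w
      · subst hvw
        simp [List.mem_cons, hn.1]
      · simp only [if_neg hvw, List.mem_cons]
        by_cases hvs : v ∈ ws <;> simp [hvs, hvw]

theorem popLayerA_cons (adjA : PySem.Dict Int (List (Int × Option Int))) (k : Nat)
    (DA : PySem.Dict Int Int) (leaf : Int) (rest : List Int) :
    popLayerA adjA (k + 1) DA (leaf :: rest)
      = popLayerA adjA k ((adjA.getD leaf []).foldl stepA (DA, rest)).1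
          ((adjA.getD leaf []).foldl stepA (DA, rest)).2 := rfl

theorem peelA_succ (adjA : PySem.Dict Int (List (Int × Option Int))) (fuel : Nat)
    (DA : PySem.Dict Int Int) (leaves : List Int) (remaining : Int) :
    peelA adjA (fuel + 1) DA leaves remaining
      = if remaining > 2 then
          peelA adjA fuel (popLayerA adjA leaves.length DA leaves).1
            (popLayerA adjA leaves.length DA leaves).2 (remaining - leaves.length)
        else leaves := rfl

theorem minus_nil (R : List Int) : minus R [] = R := by
  simp [minus]

theorem filter_partition (p R : List Int) :
    (R.filter (fun v => !(p.contains v))).length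
      + (R.filter (fun v => p.contains v)).length = R.length := by
  induction R with
  | nil => simp
  | cons a t iht =>
    rw [List.filter_cons, List.filter_cons]
    by_cases hc : p.contains a = true
    · simp only [hc, Bool.not_true, Bool.false_eq_true, if_false, if_true, List.length_cons]
      omega
    · have hc' : p.contains a = false := Bool.eq_false_iff.mpr hc
      simp only [hc', Bool.not_false, Bool.false_eq_true, if_true, if_false, List.length_cons]
      omega

theorem length_minus (R p : List Int) (hR : R.Nodup) (hp : p.Nodup) (h : ∀ x ∈ p, x ∈ R) :
    (minus R p).length = R.length - p.length := by
  have hpart := filter_partition p R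
  have hnd : (R.filter (fun v => p.contains v)).Nodup := hR.filter _
  have hset : (R.filter (fun v => p.contains v)).toFinset = p.toFinset := by
    ext a
    simp only [List.mem_toFinset, List.mem_filter, List.contains_eq_mem, decide_eq_true_eq]
    exact ⟨fun h' => h'.2, fun hp' => ⟨h a hp', hp'⟩⟩
  have hlen2 : (R.filter (fun v => p.contains v)).length = p.length := by
    calc (R.filter (fun v => p.contains v)).length
        = (R.filter (fun v => p.contains v)).toFinset.card :=
          (List.toFinset_card_of_nodup hnd).symm
      _ = p.toFinset.card := by rw [hset]
      _ = p.length := List.toFinset_card_of_nodup hp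
  unfold minus
  omega

theorem degA_getD (nodes : List Int) (edges : List (Int × Int)) (hE : EdgeOK nodes edges)
    (v : Int) :
    (nodes.foldl (fun d node =>
        d.insert node (((build_adjacency_list nodes edges).getD node []).length : Int))
        PySem.Dict.empty).getD v 0 = cnt edges nodes v := by
  rw [getD_foldl_insert_fn nodes
    (fun node => (((build_adjacency_list nodes edges).getD node []).length : Int))
    PySem.Dict.empty v]
  by_cases hv : v ∈ nodes
  · rw [if_pos hv, buildA_getD, cnt_nodes nodes edges hE v]
    simp
  · rw [if_neg hv]
    unfold cnt
    rw [adjL_not_mem nodes edges hE v hv]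
    simp

theorem eR_nodes (nodes : List Int) (edges : List (Int × Int)) (hE : EdgeOK nodes edges) :
    eR edges nodes = edges := by
  unfold eR
  rw [List.filter_eq_self]
  intro e he
  obtain ⟨h1, h2, _⟩ := hE.1 e he
  simp [h1, h2]

theorem isTree_nodes (nodes : List Int) (edges : List (Int × Int)) (hE : EdgeOK nodes edges)
    (hnd : nodes.Nodup) (h3 : 3 ≤ nodes.length) (hcnt : edges.length + 1 = nodes.length)
    (hcut : ∀ S ∈ nodes.toFinset.powerset, S.Nonempty → S ≠ nodes.toFinset →
      ∃ e ∈ edges, (e.1 ∈ S ∧ e.2 ∉ S) ∨ (e.2 ∈ S ∧ e.1 ∉ S)) :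
    IsTree edges nodes := by
  refine ⟨?_, hnd, ?_, ?_⟩
  · intro h
    rw [h] at h3
    simp at h3
  · rw [eR_nodes nodes edges hE]
    exact hcnt
  · intro S hS hne hneq
    obtain ⟨e, he, hcross⟩ := hcut S (Finset.mem_powerset.mpr hS) hne hneq
    exact ⟨e, by rw [eR_nodes nodes edges hE]; exact he, hcross⟩

-- ---- small list / iterate helpers ----

theorem eq_singleton_of_mem_iff (l : List Int) (c : Int) (hnd : l.Nodup)
    (h : ∀ v, v ∈ l ↔ v = c) : l = [c] := by
  cases l with
  | nil => exact absurd ((h c).mpr rfl) (by simp)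
  | cons a t =>
    have ha : a = c := (h a).mp (by simp)
    subst ha
    cases t with
    | nil => rfl
    | cons b t' =>
      exfalso
      have hb : b = a := (h b).mp (by simp)
      rw [List.nodup_cons] at hnd
      exact hnd.1 (by simp [hb])

theorem peelStepM_nil (edges : List (Int × Int)) : peelStepM edges [] = [] := rfl

theorem iterate_peel_nil (edges : List (Int × Int)) (k : Nat) :
    (peelStepM edges)^[k] [] = [] := by
  induction k with
  | zero => rfl
  | succ k ih => rw [Function.iterate_succ_apply, peelStepM_nil, ih]

-- a 2-vertex tree trims to nothing
theorem two_tree_step_nil (nodes : List Int) (edges : List (Int × Int)) (hE : EdgeOK nodes edges)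
    (R : List Int) (hT : IsTree edges R) (h2 : R.length = 2) : peelStepM edges R = [] := by
  obtain ⟨a, b, rfl⟩ := List.length_eq_two.mp h2
  have hsum := incidence_sum nodes edges hE [a, b] [a, b] hT.2.1 (fun v hv => hv)
  have ha := cnt_pos_of_cut edges [a, b] hT.2.1 hT.2.2.2 (by simp) a (by simp)
  have hb := cnt_pos_of_cut edges [a, b] hT.2.1 hT.2.2.2 (by simp) b (by simp)
  have hlen : (eR edges [a, b]).length = 1 := by have := hT.2.2.1; omega
  have hc1 : (eR edges [a, b]).countP (fun e => [a, b].contains e.1) ≤ 1 :=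
    hlen ▸ List.countP_le_length
  have hc2 : (eR edges [a, b]).countP (fun e => [a, b].contains e.2) ≤ 1 :=
    hlen ▸ List.countP_le_length
  simp only [List.map_cons, List.map_nil, List.sum_cons, List.sum_nil, add_zero] at hsum
  have ha1 : cnt edges [a, b] a = 1 := by omega
  have hb1 : cnt edges [a, b] b = 1 := by omega
  unfold peelStepM
  rw [List.filter_eq_nil_iff]
  intro v hv
  rcases List.mem_cons.mp hv with rfl | hv
  · simp [ha1]
  · rcases List.mem_cons.mp hv with rfl | hv
    · simp [hb1]
    · simp at hv

-- a ≥3-vertex tree whose iterated trimming reaches one vertex does not trim to two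
theorem no_two_centers (nodes : List Int) (edges : List (Int × Int)) (hE : EdgeOK nodes edges)
    (R : List Int) (hT : IsTree edges R) (h3 : 3 ≤ R.length)
    (hk : ∃ k, ((peelStepM edges)^[k] R).length = 1) :
    (peelStepM edges R).length ≠ 2 := by
  intro h2'
  obtain ⟨k, hk1⟩ := hk
  have hT' : IsTree edges (peelStepM edges R) := peel_tree nodes edges hE R hT h3
  have hnil : peelStepM edges (peelStepM edges R) = [] :=
    two_tree_step_nil nodes edges hE _ hT' h2'
  match k with
  | 0 =>
    rw [Function.iterate_zero_apply] at hk1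
    omega
  | 1 =>
    rw [Function.iterate_one] at hk1
    omega
  | (k + 2) =>
    rw [Function.iterate_succ_apply, Function.iterate_succ_apply, hnil,
      iterate_peel_nil] at hk1
    simp at hk1

theorem mathPeel_small (edges : List (Int × Int)) (f : Nat) (R : List Int)
    (h : R.length ≤ 2) : mathPeel edges f R = R := by
  cases f with
  | zero => rfl
  | succ f => simp [mathPeel, h]

theorem peelA_small (adjA : PySem.Dict Int (List (Int × Option Int))) (f : Nat)
    (D : PySem.Dict Int Int) (leaves : List Int) (remaining : Int)
    (h : ¬ remaining > 2) : peelA adjA f D leaves remaining = leaves := by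
  cases f with
  | zero => rfl
  | succ f => rw [peelA_succ, if_neg h]

theorem minus_leaves_eq_step (edges : List (Int × Int)) (R L : List Int)
    (hchar : ∀ v, v ∈ L ↔ (v ∈ R ∧ cnt edges R v = 1)) :
    minus R L = peelStepM edges R := by
  unfold minus peelStepM
  apply List.filter_congr
  intro v hv
  have : (v ∈ L) ↔ (cnt edges R v = 1) := by rw [hchar v]; simp [hv]
  rw [Bool.eq_iff_iff]
  simp only [Bool.not_eq_true', List.contains_eq_mem, decide_eq_false_iff_not,
    beq_eq_false_iff_ne, ne_eq]
  exact not_congr this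

-- ---- the layer lemma for A ----

theorem popLayer_spec (nodes : List Int) (edges : List (Int × Int)) (hE : EdgeOK nodes edges)
    (adjA : PySem.Dict Int (List (Int × Option Int)))
    (hA : ∀ v, adjA.getD v [] = (adjL edges v).map (fun w => (w, (none : Option Int))))
    (R : List Int) :
    ∀ (ℓ p acc : List Int) (D : PySem.Dict Int Int),
      (p ++ ℓ).Nodup →
      (∀ x ∈ p ++ ℓ, x ∈ R ∧ cnt edges R x = 1) →
      acc.Nodup →
      (∀ v, v ∈ acc ↔ (cnt edges (minus R p) v ≤ 1 ∧ 2 ≤ cnt edges R v)) →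
      (∀ v, D.getD v 0 = cnt edges (minus R p) v) →
      ((popLayerA adjA ℓ.length D (ℓ ++ acc)).2.Nodup ∧
       (∀ v, v ∈ (popLayerA adjA ℓ.length D (ℓ ++ acc)).2 ↔
          (cnt edges (minus R (p ++ ℓ)) v ≤ 1 ∧ 2 ≤ cnt edges R v)) ∧
       (∀ v, (popLayerA adjA ℓ.length D (ℓ ++ acc)).1.getD v 0
          = cnt edges (minus R (p ++ ℓ)) v)) := by
  intro ℓ
  induction ℓ with
  | nil =>
    intro p acc D hnd hleaf haccnd hacc hD
    simp only [List.length_nil, List.nil_append, List.append_nil]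
    exact ⟨haccnd, hacc, hD⟩
  | cons u ℓ' ih =>
    intro p acc D hnd hleaf haccnd hacc hD
    have hshape : (u :: ℓ') ++ acc = u :: (ℓ' ++ acc) := rfl
    have hlen : (u :: ℓ').length = ℓ'.length + 1 := rfl
    rw [hshape, hlen, popLayerA_cons, hA u]
    obtain ⟨hf2, hf1⟩ := foldNbrs_A (adjL edges u) (adjL_nodup nodes edges hE u) D (ℓ' ++ acc)
    have hnd3 := List.nodup_append.mp hnd
    have huL : u ∈ R ∧ cnt edges R u = 1 := hleaf u (by simp)
    have hup : u ∉ p := fun hup => hnd3.2.2 u hup u (by simp) rfl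
    have huminus : u ∈ minus R p := (mem_minus R p u).mpr ⟨huL.1, hup⟩
    have hcnt_snoc : ∀ v, cnt edges (minus R (p ++ [u])) v
        = cnt edges (minus R p) v - (if v ∈ adjL edges u then 1 else 0) :=
      fun v => cnt_minus_snoc nodes edges hE R p u v huminus
    have happ : p ++ u :: ℓ' = (p ++ [u]) ++ ℓ' := by simp
    have hnd' : ((p ++ [u]) ++ ℓ').Nodup := by rw [← happ]; exact hnd
    have hleaf' : ∀ x ∈ (p ++ [u]) ++ ℓ', x ∈ R ∧ cnt edges R x = 1 := by
      rw [← happ]; exact hleaf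
    have hNmem : ∀ v, v ∈ (adjL edges u).filter (fun w => D.getD w 0 == 2)
        ↔ (v ∈ adjL edges u ∧ cnt edges (minus R p) v = 2) := by
      intro v
      rw [List.mem_filter]
      simp [hD v]
    have haccnd' : (acc ++ (adjL edges u).filter (fun w => D.getD w 0 == 2)).Nodup := by
      refine List.Nodup.append haccnd ((adjL_nodup nodes edges hE u).filter _) ?_
      intro a ha haN
      have h2 := ((hNmem a).mp haN).2
      have h1 := ((hacc a).mp ha).1
      omega
    have hacc' : ∀ v, v ∈ acc ++ (adjL edges u).filter (fun w => D.getD w 0 == 2)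
        ↔ (cnt edges (minus R (p ++ [u])) v ≤ 1 ∧ 2 ≤ cnt edges R v) := by
      intro v
      rw [List.mem_append, hacc v, hNmem v, hcnt_snoc v]
      have hmono : cnt edges (minus R p) v ≤ cnt edges R v :=
        cnt_mono edges R (minus R p) (fun x hx => ((mem_minus R p x).mp hx).1) v
      have hnn := cnt_nonneg edges (minus R p) v
      by_cases hadj : v ∈ adjL edges u
      · rw [if_pos hadj]
        constructor
        · rintro (⟨hle, hge⟩ | ⟨_, h2⟩)
          · exact ⟨by omega, hge⟩
          · exact ⟨by omega, by omega⟩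
        · rintro ⟨hle, hge⟩
          by_cases hc : cnt edges (minus R p) v ≤ 1
          · exact Or.inl ⟨hc, hge⟩
          · exact Or.inr ⟨hadj, by omega⟩
      · rw [if_neg hadj]
        constructor
        · rintro (⟨hle, hge⟩ | ⟨hf, _⟩)
          · exact ⟨by omega, hge⟩
          · exact absurd hf hadj
        · rintro ⟨hle, hge⟩
          exact Or.inl ⟨by omega, hge⟩
    have hD' : ∀ v, (((adjL edges u).map (fun w => (w, (none : Option Int)))).foldl stepA
          (D, ℓ' ++ acc)).1.getD v 0 = cnt edges (minus R (p ++ [u])) v := by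
      intro v
      rw [hf1 v, hD v, hcnt_snoc v]
    have hres := ih (p ++ [u]) (acc ++ (adjL edges u).filter (fun w => D.getD w 0 == 2))
      (((adjL edges u).map (fun w => (w, (none : Option Int)))).foldl stepA (D, ℓ' ++ acc)).1
      hnd' hleaf' haccnd' hacc' hD'
    rw [hf2] at *
    rw [happ]
    simpa [List.append_assoc] using hres

-- ---- A's loop computes mathPeel ----

theorem peelA_spec (nodes : List Int) (edges : List (Int × Int)) (hE : EdgeOK nodes edges)
    (adjA : PySem.Dict Int (List (Int × Option Int)))
    (hA : ∀ v, adjA.getD v [] = (adjL edges v).map (fun w => (w, (none : Option Int)))) :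
    ∀ (f : Nat) (R L : List Int) (D : PySem.Dict Int Int),
      IsTree edges R → 3 ≤ R.length → (∀ v ∈ R, v ∈ nodes) →
      L.Nodup → (∀ v, v ∈ L ↔ (v ∈ R ∧ cnt edges R v = 1)) →
      (∀ v, D.getD v 0 = cnt edges R v) →
      (∀ v, v ∉ R → cnt edges R v ≤ 1) →
      (∃ k, ((peelStepM edges)^[k] R).length = 1) →
      R.length ≤ f + 2 →
      peelA adjA f D L (R.length : Int) = mathPeel edges f R := by
  intro f
  induction f with
  | zero =>
    intro R L D hT h3 hsub hLnd hLchar hD hdead hk hfuel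
    omega
  | succ f ih =>
    intro R L D hT h3 hsub hLnd hLchar hD hdead hk hfuel
    have hgt : ((R.length : Int) > 2) := by omega
    rw [peelA_succ, if_pos hgt]
    have hLR : ∀ x ∈ L, x ∈ R := fun x hx => ((hLchar x).mp hx).1
    obtain ⟨vleaf, hvleaf, hvleaf1⟩ := exists_leaf nodes edges hE R hT (by omega)
    have hL1 : 1 ≤ L.length :=
      List.length_pos_of_ne_nil (List.ne_nil_of_mem ((hLchar vleaf).mpr ⟨hvleaf, hvleaf1⟩))
    have hpop := popLayer_spec nodes edges hE adjA hA R L [] [] D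
      (by simpa using hLnd)
      (by intro x hx; exact (hLchar x).mp (by simpa using hx))
      (by simp)
      (by intro v; rw [minus_nil]; exact iff_of_false (by simp) (by omega))
      (by intro v; rw [minus_nil]; exact hD v)
    rw [List.append_nil] at hpop
    obtain ⟨hnd', hchar', hD'⟩ := hpop
    simp only [List.nil_append] at hchar' hD'
    have hminus : minus R L = peelStepM edges R := minus_leaves_eq_step edges R L hLchar
    rw [hminus] at hchar' hD'
    have hlenm : (minus R L).length = R.length - L.length :=
      length_minus R L hT.2.1 hLnd hLR
    have hLlen : L.length ≤ R.length := length_le_of_nodup_subset L R hLnd hLR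
    rw [hminus] at hlenm
    have hrem : (R.length : Int) - (L.length : Int)
        = ((peelStepM edges R).length : Int) := by omega
    rw [hrem]
    have hT' : IsTree edges (peelStepM edges R) := peel_tree nodes edges hE R hT h3
    have hm : mathPeel edges (f + 1) R = mathPeel edges f (peelStepM edges R) := by
      have : ¬ R.length ≤ 2 := by omega
      simp [mathPeel, this]
    rw [hm]
    have hRmem : ∀ x, x ∈ peelStepM edges R ↔ (x ∈ R ∧ cnt edges R x ≠ 1) := by
      intro x
      unfold peelStepM
      rw [List.mem_filter]
      simp
    have hsub' : ∀ v ∈ peelStepM edges R, v ∈ nodes :=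
      fun v hv => hsub v ((hRmem v).mp hv).1
    have hdead' : ∀ v, v ∉ peelStepM edges R → cnt edges (peelStepM edges R) v ≤ 1 := by
      intro v hv
      have hmono : cnt edges (peelStepM edges R) v ≤ cnt edges R v :=
        cnt_mono edges R (peelStepM edges R) (fun x hx => ((hRmem x).mp hx).1) v
      by_cases hvR : v ∈ R
      · have : cnt edges R v = 1 := by
          by_contra hne
          exact hv ((hRmem v).mpr ⟨hvR, hne⟩)
        omega
      · have := hdead v hvR
        omega
    have hchar'' : ∀ v, v ∈ (popLayerA adjA L.length D L).2
        ↔ (v ∈ peelStepM edges R ∧ 2 ≤ cnt edges R v ∧ cnt edges (peelStepM edges R) v ≤ 1) := by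
      intro v
      rw [hchar' v]
      constructor
      · rintro ⟨hle, hge⟩
        have hvR : v ∈ R := by
          by_contra hvR
          have := hdead v hvR
          omega
        exact ⟨(hRmem v).mpr ⟨hvR, by omega⟩, hge, hle⟩
      · rintro ⟨_, hge, hle⟩
        exact ⟨hle, hge⟩
    have h2' : (peelStepM edges R).length ≠ 2 :=
      no_two_centers nodes edges hE R hT h3 hk
    by_cases h3' : 3 ≤ (peelStepM edges R).length
    · -- continue peeling
      have hchar3 : ∀ v, v ∈ (popLayerA adjA L.length D L).2
          ↔ (v ∈ peelStepM edges R ∧ cnt edges (peelStepM edges R) v = 1) := by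
        intro v
        rw [hchar'' v]
        constructor
        · rintro ⟨hvR', hge, hle⟩
          have := cnt_pos_of_cut edges (peelStepM edges R) hT'.2.1 hT'.2.2.2
            (by omega) v hvR'
          exact ⟨hvR', by omega⟩
        · rintro ⟨hvR', h1⟩
          have hvR := ((hRmem v).mp hvR').1
          have hne1 := ((hRmem v).mp hvR').2
          have := cnt_pos_of_cut edges R hT.2.1 hT.2.2.2 (by omega) v hvR
          exact ⟨hvR', by omega, by omega⟩
      have hk' : ∃ k, ((peelStepM edges)^[k] (peelStepM edges R)).length = 1 := by
        obtain ⟨k, hk1⟩ := hk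
        match k with
        | 0 =>
          rw [Function.iterate_zero_apply] at hk1
          omega
        | (k + 1) =>
          rw [Function.iterate_succ_apply] at hk1
          exact ⟨k, hk1⟩
      exact ih (peelStepM edges R) (popLayerA adjA L.length D L).2
        (popLayerA adjA L.length D L).1 hT' h3' hsub' hnd' hchar3 hD' hdead' hk'
        (by omega)
    · -- the trimmed tree is a single vertex; both sides return it
      have hne := hT'.1
      have h1' : (peelStepM edges R).length = 1 := by
        have := List.length_pos_of_ne_nil hne
        omega
      obtain ⟨c, hc⟩ := List.length_eq_one_iff.mp h1'
      have hcR : c ∈ R ∧ cnt edges R c ≠ 1 := (hRmem c).mp (by rw [hc]; simp)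
      have hcnt2 : 2 ≤ cnt edges R c := by
        have := cnt_pos_of_cut edges R hT.2.1 hT.2.2.2 (by omega) c hcR.1
        omega
      have hcnt0 : cnt edges (peelStepM edges R) c ≤ 1 := by
        have hfil : (adjL edges c).filter (fun w => (peelStepM edges R).contains w) = [] := by
          rw [List.filter_eq_nil_iff]
          intro w hw
          simp only [List.contains_eq_mem, decide_eq_true_eq, hc, List.mem_singleton]
          intro hwc
          exact not_self_mem_adjL nodes edges hE c (hwc ▸ hw)
        unfold cnt
        rw [hfil]
        simp
      have hsingle : ∀ v, v ∈ (popLayerA adjA L.length D L).2 ↔ v = c := by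
        intro v
        rw [hchar'' v]
        constructor
        · rintro ⟨hvR', _, _⟩
          rw [hc] at hvR'
          simpa using hvR'
        · rintro rfl
          exact ⟨by rw [hc]; simp, hcnt2, hcnt0⟩
      rw [eq_singleton_of_mem_iff (popLayerA adjA L.length D L).2 c hnd' hsingle]
      rw [peelA_small adjA f _ _ _ (by rw [h1']; omega)]
      rw [mathPeel_small edges f (peelStepM edges R) (by omega), hc]

-- ---- B's recursion computes mathPeel ----

theorem countDeg_fold (edges : List (Int × Int)) :
    ∀ (d : PySem.Dict Int Int) (v : Int),
      (edges.foldl (fun d e =>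
        let d := d.modify e.1 0 (fun x => x + 1)
        d.modify e.2 0 (fun x => x + 1)) d).getD v 0
      = d.getD v 0 + ((adjL edges v).length : Int) := by
  induction edges with
  | nil => intro d v; simp [adjL]
  | cons e es ih =>
    intro d v
    rw [List.foldl_cons, ih, adjL_cons]
    simp only [PySem.Dict.getD_modify, List.length_append]
    by_cases h1 : e.1 = v <;> by_cases h2 : e.2 = v <;>
      simp_all [eq_comm] <;> push_cast <;> ring

theorem countDeg_getD (edges : List (Int × Int)) (v : Int) :
    (countDeg edges).getD v 0 = ((adjL edges v).length : Int) := by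
  unfold countDeg
  rw [countDeg_fold]
  simp [pysem]

theorem adjL_eR (edges : List (Int × Int)) (R : List Int) (v : Int) (hv : v ∈ R) :
    adjL (eR edges R) v = (adjL edges v).filter (fun w => R.contains w) := by
  induction edges with
  | nil => simp [adjL, eR]
  | cons e es ih =>
    have hcons : eR (e :: es) R
        = if (R.contains e.1 && R.contains e.2) = true then e :: eR es R else eR es R := by
      unfold eR
      rw [List.filter_cons]
    rw [adjL_cons e es v, List.filter_append, ← ih, hcons]
    by_cases hin : (R.contains e.1 && R.contains e.2) = true
    · rw [if_pos hin, adjL_cons]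
      have hin' : e.1 ∈ R ∧ e.2 ∈ R := by
        simpa [List.contains_eq_mem] using hin
      congr 1
      by_cases h1 : e.1 = v <;> by_cases h2 : e.2 = v <;>
        simp [h1, h2, List.filter_cons, hin'.1, hin'.2] <;> simp_all
    · rw [if_neg hin]
      have hnin : ¬ (e.1 ∈ R ∧ e.2 ∈ R) := by
        intro hc
        exact hin (by simp [List.contains_eq_mem, hc.1, hc.2])
      have hz : (((if e.1 = v then [e.2] else []) ++ (if e.2 = v then [e.1] else [])).filter
          (fun w => R.contains w)) = [] := by
        by_cases h1 : e.1 = v <;> by_cases h2 : e.2 = v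
        · exact absurd ⟨h1 ▸ hv, h2 ▸ hv⟩ hnin
        · have h2R : e.2 ∉ R := fun hc => hnin ⟨h1 ▸ hv, hc⟩
          simp [h1, h2, List.filter_cons, h2R]
        · have h1R : e.1 ∉ R := fun hc => hnin ⟨hc, h2 ▸ hv⟩
          simp [h1, h2, List.filter_cons, h1R]
        · simp [h1, h2]
      rw [hz, List.nil_append]

theorem altRec_spec (nodes : List Int) (edges : List (Int × Int)) (hE : EdgeOK nodes edges) :
    ∀ (f : Nat) (R : List Int), IsTree edges R → (∀ v ∈ R, v ∈ nodes) →
      find_tree_centers_alt_rec f R (eR edges R) = mathPeel edges f R := by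
  intro f
  induction f with
  | zero => intro R _ _; rfl
  | succ f ih =>
    intro R hT hsub
    by_cases hle : R.length ≤ 2
    · have hleI : ((R.length : Int) ≤ 2) := by exact_mod_cast hle
      simp only [find_tree_centers_alt_rec, mathPeel, if_pos hleI, if_pos hle]
    · have hgt : ¬ ((R.length : Int) ≤ 2) := fun h => hle (by exact_mod_cast h)
      have hm : mathPeel edges (f + 1) R = mathPeel edges f (peelStepM edges R) := by
        simp [mathPeel, hle]
      rw [hm]
      show (if (R.length : Int) ≤ 2 then R else
        find_tree_centers_alt_rec f
          (R.filter (fun v => !((countDeg (eR edges R)).getD v 0 == 1)))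
          ((eR edges R).filter (fun e =>
            (PySem.Set.ofList (R.filter (fun v => !((countDeg (eR edges R)).getD v 0 == 1)))).contains e.1 &&
            (PySem.Set.ofList (R.filter (fun v => !((countDeg (eR edges R)).getD v 0 == 1)))).contains e.2)))
        = mathPeel edges f (peelStepM edges R)
      rw [if_neg hgt]
      have hkeep : R.filter (fun v => !((countDeg (eR edges R)).getD v 0 == 1))
          = peelStepM edges R := by
        unfold peelStepM
        apply List.filter_congr
        intro v hv
        rw [countDeg_getD, adjL_eR edges R v hv]
        rfl
      rw [hkeep]
      have hsubk : ∀ x ∈ peelStepM edges R, x ∈ R := by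
        intro x hx
        exact List.mem_of_mem_filter hx
      have hkept : (eR edges R).filter (fun e =>
            (PySem.Set.ofList (peelStepM edges R)).contains e.1 &&
            (PySem.Set.ofList (peelStepM edges R)).contains e.2)
          = eR edges (peelStepM edges R) := by
        show (eR edges R).filter _ = eR edges (peelStepM edges R)
        unfold eR
        rw [List.filter_filter]
        apply List.filter_congr
        intro e _
        rw [Bool.eq_iff_iff]
        simp only [Bool.and_eq_true, List.contains_eq_mem, decide_eq_true_eq, pysem]
        constructor
        · rintro ⟨⟨h1, h2⟩, _⟩
          exact ⟨h1, h2⟩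
        · rintro ⟨h1, h2⟩
          exact ⟨⟨h1, h2⟩, hsubk e.1 h1, hsubk e.2 h2⟩
      rw [hkept]
      exact ih (peelStepM edges R) (peel_tree nodes edges hE R hT (by omega))
        (fun v hv => hsub v (List.mem_of_mem_filter hv))

-- ===== VERDICT (by name: the statement is the Claim_ definition above) =====
theorem find_tree_centers_spec : Claim_equal_find_tree_centers := by
  intro nodes edges _hdom hpre
  unfold Spec_find_tree_centers
  by_cases hn2 : nodes.length ≤ 2
  · have hgA : ((nodes.length : Int)) ≤ 2 := by exact_mod_cast hn2
    have hB : find_tree_centers_alt nodes edges = nodes := by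
      unfold find_tree_centers_alt
      cases hn : nodes.length with
      | zero => rfl
      | succ m =>
        show find_tree_centers_alt_rec (m + 1) nodes edges = nodes
        unfold find_tree_centers_alt_rec
        rw [if_pos hgA]
    rw [hB]
    unfold find_tree_centers
    simp only [if_pos hgA]
  · have h3 : 3 ≤ nodes.length := by omega
    rcases hpre with h | ⟨hnd, hcnt, hends, hukey, hcut, hk⟩
    · exact absurd h hn2
    have hE : EdgeOK nodes edges := ⟨hends, hukey⟩
    have hT : IsTree edges nodes := isTree_nodes nodes edges hE hnd h3 hcnt hcut
    have hgt : ¬ ((nodes.length : Int) ≤ 2) := fun hc => hn2 (by exact_mod_cast hc)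
    have hBalt : find_tree_centers_alt nodes edges = mathPeel edges nodes.length nodes := by
      unfold find_tree_centers_alt
      have := altRec_spec nodes edges hE nodes.length nodes hT (fun v hv => hv)
      rwa [eR_nodes nodes edges hE] at this
    rw [hBalt]
    unfold find_tree_centers
    simp only [if_neg hgt]
    have hDA : ∀ v, (nodes.foldl (fun d node =>
        d.insert node (((build_adjacency_list nodes edges).getD node []).length : Int))
        PySem.Dict.empty).getD v 0 = cnt edges nodes v := degA_getD nodes edges hE
    have hleavesA : (nodes.foldl (fun q node => if (nodes.foldl (fun d node =>
          d.insert node (((build_adjacency_list nodes edges).getD node []).length : Int))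
          PySem.Dict.empty).getD node 0 == 1 then q ++ [node] else q) [])
        = nodes.filter (fun v => cnt edges nodes v == 1) := by
      rw [PySem.List.foldl_append_if_eq_filter]
      exact List.filter_congr (fun v _ => by rw [hDA v])
    rw [hleavesA]
    have hk' : ∃ k, ((peelStepM edges)^[k] nodes).length = 1 := by
      obtain ⟨k, _, hk1⟩ := hk
      exact ⟨k, hk1⟩
    exact peelA_spec nodes edges hE (build_adjacency_list nodes edges)
      (buildA_getD nodes edges) nodes.length nodes
      (nodes.filter (fun v => cnt edges nodes v == 1))
      _ hT h3 (fun v hv => hv)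
      (hnd.filter _)
      (by intro v
          rw [List.mem_filter]
          simp)
      hDA
      (by intro v hv
          unfold cnt
          rw [adjL_not_mem nodes edges hE v hv]
          simp)
      hk' (by omega)
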